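-- pv_equiv track=rewrite | github.com/sfmalloy/advent-of-code-2017 | solutions/d21.py | search_rules
-- ===== SOURCE A (Python) =====
-- def search_rules(rules: dict[str, str], unit: list[tuple[str]]):
--     for _ in range(4):
--         key = '/'.join(''.join(row) for row in unit)
--         if key in rules:
--             return rules[key].split('/')
--         unit = rotate(unit)
--     unit = list(reversed(unit))
--     for _ in range(4):
--         key = '/'.join(''.join(row) for row in unit)
--         if key in rules:
--             return rules[key].split('/')
--         unit = rotate(unit)
--
-- def rotate(unit: list[tuple[str]]):
--     return list(reversed(list(zip(*unit))))
-- ===== SOURCE B (Python) =====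
-- def search_rules(rules: dict[str, str], unit: list[tuple[str]]):
--     # Phase 1: index the 8 orientations: key -> earliest orientation rank.
--     rank = {}
--     i = 0
--     for _ in range(2):
--         for _ in range(4):
--             k = '/'.join(''.join(row) for row in unit)
--             if k not in rank:
--                 rank[k] = i
--             i += 1
--             unit = rotate(unit)
--         unit = list(reversed(unit))
--     # Phase 2: one scan over the rules, keeping the entry of minimal rank.
--     best = None
--     for k, v in rules.items():
--         r = rank.get(k)
--         if r is not None and (best is None or r < best[0]):
--             best = (r, v)
--     if best is not None:
--         return best[1].split('/')
--     return None
--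
-- def rotate(unit: list[tuple[str]]):
--     return list(reversed(list(zip(*unit))))
-- ===== Notes on version B (the rewrite author's own statement) =====
-- stated objective: alternative
-- what changed: B inverts the lookup direction: it builds a rank index key->earliest-orientation-number for the 8 orientations, then makes a single scan over the rules selecting the entry of minimal rank, instead of A's probe-the-dict-per-orientation loop with early return.
import Mathlib
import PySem

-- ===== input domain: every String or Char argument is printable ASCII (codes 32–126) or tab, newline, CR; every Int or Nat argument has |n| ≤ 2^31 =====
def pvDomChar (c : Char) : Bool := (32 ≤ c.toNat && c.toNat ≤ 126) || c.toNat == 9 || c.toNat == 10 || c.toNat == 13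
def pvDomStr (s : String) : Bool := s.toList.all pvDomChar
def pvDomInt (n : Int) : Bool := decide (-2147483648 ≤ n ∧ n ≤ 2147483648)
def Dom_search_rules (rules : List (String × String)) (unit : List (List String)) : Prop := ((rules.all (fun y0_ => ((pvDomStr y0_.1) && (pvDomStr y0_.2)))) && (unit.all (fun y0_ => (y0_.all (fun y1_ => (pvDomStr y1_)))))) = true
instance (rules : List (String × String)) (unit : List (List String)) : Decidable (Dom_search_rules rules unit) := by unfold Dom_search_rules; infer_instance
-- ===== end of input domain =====

-- B inverts the lookup direction: it indexes the 8 orientations by earliest rank and makes a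
-- single min-rank scan over the rules, instead of A's probe-per-orientation loop; objective: alternative.

-- ===== PORT A =====
-- shared helper of both Pythons: rotate(unit) = list(reversed(list(zip(*unit))))
def pvZipStar (u : List (List String)) : List (List String) :=
  match u with
  | [] => []
  | r :: rs =>
      let n := rs.foldl (fun m row => min m row.length) r.length
      (List.range n).map (fun j => u.map (fun row => row.getD j ""))

def pvRotate (u : List (List String)) : List (List String) :=
  (pvZipStar u).reverse

-- '/'.join(''.join(row) for row in unit)
def pvKey (u : List (List String)) : String :=
  PySem.Str.join "/" (u.map (fun row => PySem.Str.join "" row))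

-- A's for-loop: check key, else rotate; returns (result, final unit)
def pvLoopA (rules : List (String × String)) (u : List (List String)) :
    Nat → Option (List String) × List (List String)
  | 0 => (none, u)
  | n + 1 =>
      match rules.lookup (pvKey u) with
      | some v => (some (((PySem.Str.split? v "/").getD [])), u)
      | none => pvLoopA rules (pvRotate u) n

def search_rules (rules : List (String × String)) (unit : List (List String)) : Option (List String) :=
  match pvLoopA rules unit 4 with
  | (some r, _) => some r
  | (none, u) => (pvLoopA rules u.reverse 4).1

-- ===== PORT B =====
-- inner 'for _ in range(4): k = key(unit); rank.setdefault-style insert; i += 1; unit = rotate(unit)'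
def pvRankBuild (d : PySem.Dict String Nat) (i : Nat) (u : List (List String)) :
    Nat → PySem.Dict String Nat × Nat × List (List String)
  | 0 => (d, i, u)
  | n + 1 =>
      let k := pvKey u
      let d' := if (d.get? k).isSome then d else d.insert k i
      pvRankBuild d' (i + 1) (pvRotate u) n

-- 'for k, v in rules.items(): r = rank.get(k); if r is not None and (best is None or r < best[0]): best = (r, v)'
def pvBestScan (rank : PySem.Dict String Nat) :
    List (String × String) → Option (Nat × String) → Option (Nat × String)
  | [], best => best
  | (k, v) :: rest, best =>
      let best' :=
        match rank.get? k, best with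
        | some r, none => some (r, v)
        | some r, some p => if r < p.1 then some (r, v) else some p
        | none, b => b
      pvBestScan rank rest best'

def search_rules_alt (rules : List (String × String)) (unit : List (List String)) : Option (List String) :=
  let s1 := pvRankBuild PySem.Dict.empty 0 unit 4          -- outer range(2) unrolled: first pass,
  let s2 := pvRankBuild s1.1 s1.2.1 s1.2.2.reverse 4       -- reversal, second pass
  (pvBestScan s2.1 rules none).map (fun p => (PySem.Str.split? p.2 "/").getD [])

-- ===== PRECONDITION & SPEC =====
def Spec_search_rules (rules : List (String × String)) (unit : List (List String)) (out : Option (List String)) : Prop := out = search_rules_alt rules unit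
instance (rules : List (String × String)) (unit : List (List String)) (out : Option (List String)) : Decidable (Spec_search_rules rules unit out) := by unfold Spec_search_rules; infer_instance

-- ===== CLAIM (what is proved, stated in full; the proofs are below) =====
def Claim_equal_search_rules : Prop := ∀ (rules : List (String × String)) (unit : List (List String)), Dom_search_rules rules unit → Spec_search_rules rules unit (search_rules rules unit)

-- ===== LEMMAS AND PROOFS =====

-- the sequence of keys A checks / B indexes, starting from grid u, n steps
def pvKeysN (u : List (List String)) : Nat → List String
  | 0 => []
  | n + 1 => pvKey u :: pvKeysN (pvRotate u) n

-- first index of k in a list of keys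
def pvIdx : List String → String → Option Nat
  | [], _ => none
  | x :: xs, k => if x = k then some 0 else (pvIdx xs k).map (· + 1)

-- A's behaviour as a scan over the key list
def pvScanK (rules : List (String × String)) : List String → Option (List String)
  | [] => none
  | k :: ks =>
      match rules.lookup k with
      | some v => some ((PySem.Str.split? v "/").getD [])
      | none => pvScanK rules ks

-- B's min-rank fold with the rank function abstracted
def pvFoldMin (f : String → Option Nat) :
    List (String × String) → Option (Nat × String) → Option (Nat × String)
  | [], best => best
  | (k, v) :: rest, best =>
      pvFoldMin f rest
        (match f k, best with
         | some r, none => some (r, v)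
         | some r, some p => if r < p.1 then some (r, v) else some p
         | none, b => b)

theorem pvFoldMin_congr (f g : String → Option Nat) (h : ∀ k, f k = g k)
    (rules : List (String × String)) (b : Option (Nat × String)) :
    pvFoldMin f rules b = pvFoldMin g rules b := by
  induction rules generalizing b with
  | nil => rfl
  | cons q rest ih =>
      cases q with | mk k v =>
      simp only [pvFoldMin, h k]
      exact ih _

theorem pvBestScan_eq (d : PySem.Dict String Nat) (rules : List (String × String))
    (b : Option (Nat × String)) :
    pvBestScan d rules b = pvFoldMin (fun k => d.get? k) rules b := by
  induction rules generalizing b with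
  | nil => rfl
  | cons p rest ih => cases p with | mk k v => simp only [pvBestScan, pvFoldMin]; exact ih _

theorem pvLoopA_fst (rules : List (String × String)) (u : List (List String)) (n : Nat) :
    (pvLoopA rules u n).1 = pvScanK rules (pvKeysN u n) := by
  induction n generalizing u with
  | zero => rfl
  | succ n ih =>
      simp only [pvLoopA, pvKeysN, pvScanK]
      cases rules.lookup (pvKey u) <;> simp [ih]

theorem pvLoopA_snd_of_none (rules : List (String × String)) (u : List (List String)) (n : Nat)
    (h : (pvLoopA rules u n).1 = none) : (pvLoopA rules u n).2 = pvRotate^[n] u := by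
  induction n generalizing u with
  | zero => rfl
  | succ n ih =>
      simp only [pvLoopA] at h ⊢
      cases hl : rules.lookup (pvKey u) with
      | some v => simp [hl] at h
      | none =>
          simp only [hl] at h ⊢
          rw [ih _ h, Function.iterate_succ_apply]

theorem pvScanK_append (rules : List (String × String)) (a b : List String) :
    pvScanK rules (a ++ b) =
      match pvScanK rules a with
      | some r => some r
      | none => pvScanK rules b := by
  induction a with
  | nil => simp [pvScanK]
  | cons k ks ih =>
      simp only [List.cons_append, pvScanK]
      cases rules.lookup k <;> simp [ih]

theorem length_pvKeysN (u : List (List String)) (n : Nat) : (pvKeysN u n).length = n := by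
  induction n generalizing u with
  | zero => rfl
  | succ n ih => simp [pvKeysN, ih]

theorem pvRankBuild_snd (d : PySem.Dict String Nat) (i : Nat) (u : List (List String)) (n : Nat) :
    (pvRankBuild d i u n).2 = (i + n, pvRotate^[n] u) := by
  induction n generalizing d i u with
  | zero => rfl
  | succ n ih =>
      simp only [pvRankBuild, ih, Function.iterate_succ_apply]
      have h : i + 1 + n = i + (n + 1) := by omega
      rw [h]

theorem pvIdx_append (P Q : List String) (k : String) :
    pvIdx (P ++ Q) k =
      match pvIdx P k with
      | some j => some j
      | none => (pvIdx Q k).map (· + P.length) := by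
  induction P with
  | nil => simp [pvIdx]
  | cons x xs ih =>
      simp only [List.cons_append, pvIdx]
      by_cases hx : x = k
      · simp [hx]
      · simp only [hx, if_false, ih]
        cases pvIdx xs k with
        | some j => simp
        | none =>
            cases pvIdx Q k with
            | none => simp
            | some j => simp [List.length_cons]; omega

theorem pvRankBuild_get? (n : Nat) (u : List (List String)) (P : List String)
    (d : PySem.Dict String Nat) (hd : ∀ k, d.get? k = pvIdx P k) (k : String) :
    ((pvRankBuild d P.length u n).1).get? k = pvIdx (P ++ pvKeysN u n) k := by
  induction n generalizing u P d with
  | zero => simp [pvRankBuild, pvKeysN, hd]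
  | succ n ih =>
      simp only [pvRankBuild, pvKeysN]
      have hP : (P ++ [pvKey u]).length = P.length + 1 := by simp
      have hstep : ∀ k',
          (if (d.get? (pvKey u)).isSome then d else d.insert (pvKey u) P.length).get? k'
            = pvIdx (P ++ [pvKey u]) k' := by
        intro k'
        rw [pvIdx_append]
        by_cases hin : (d.get? (pvKey u)).isSome
        · rw [if_pos hin, hd]
          cases hP0 : pvIdx P k' with
          | none =>
              have hk : pvKey u ≠ k' := by
                intro h; rw [hd, h, hP0] at hin; simp at hin
              simp [pvIdx, hk]
          | some j => rfl
        · rw [if_neg hin, PySem.Dict.get?_insert]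
          by_cases hk : k' = pvKey u
          · rw [if_pos hk, hk]
            have hnone : pvIdx P (pvKey u) = none := by
              rw [← hd]
              cases h : d.get? (pvKey u) with
              | none => rfl
              | some _ => rw [h] at hin; simp at hin
            rw [hnone]
            simp [pvIdx]
          · rw [if_neg hk, hd]
            have hne : pvKey u ≠ k' := fun h2 => hk (Eq.symm h2)
            cases h : pvIdx P k' with
            | none => simp [pvIdx, hne]
            | some j => rfl
      have := ih (pvRotate u) (P ++ [pvKey u])
        (if (d.get? (pvKey u)).isSome then d else d.insert (pvKey u) P.length) hstep
      rw [hP] at this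
      rw [this, List.append_assoc]
      rfl

theorem lookup_none_forall {α β : Type} [BEq α] [LawfulBEq α] (a : α) (l : List (α × β))
    (h : List.lookup a l = none) : ∀ p ∈ l, p.1 ≠ a := by
  induction l with
  | nil => intro p hp; cases hp
  | cons q rest ih =>
      intro p hp
      simp only [List.lookup] at h
      cases hq : a == q.1 with
      | true => rw [hq] at h; cases h
      | false =>
          rw [hq] at h
          rcases List.mem_cons.mp hp with rfl | hp'
          · intro he; rw [← he] at hq; simp at hq
          · exact ih h p hp'

-- all-miss: the fold leaves best unchanged
theorem pvFoldMin_none (f : String → Option Nat) (rules : List (String × String))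
    (b : Option (Nat × String)) (h : ∀ p ∈ rules, f p.1 = none) :
    pvFoldMin f rules b = b := by
  induction rules generalizing b with
  | nil => rfl
  | cons q rest ih =>
      cases q with | mk k v =>
      have hk : f k = none := h (k, v) (by simp)
      simp only [pvFoldMin, hk]
      exact ih _ (fun p hp => h p (by simp [hp]))

-- a best of rank 0 is final
theorem pvFoldMin_zero (f : String → Option Nat) (rules : List (String × String)) (w : String) :
    pvFoldMin f rules (some (0, w)) = some (0, w) := by
  induction rules with
  | nil => rfl
  | cons q rest ih =>
      cases q with | mk k v =>
      simp only [pvFoldMin]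
      cases f k <;> simp [ih]

-- if k0 is the unique rank-0 key and occurs in rules, the fold returns its first value
theorem pvFoldMin_hit (f : String → Option Nat) (k0 : String) (v : String)
    (rules : List (String × String)) (b : Option (Nat × String))
    (hf0 : f k0 = some 0) (hinj : ∀ k, k ≠ k0 → f k ≠ some 0)
    (hl : List.lookup k0 rules = some v) (hb : ∀ p, b = some p → 0 < p.1) :
    pvFoldMin f rules b = some (0, v) := by
  induction rules generalizing b with
  | nil => cases hl
  | cons q rest ih =>
      cases q with | mk k w =>
      simp only [List.lookup] at hl
      cases hbeq : k0 == k with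
      | true =>
          rw [hbeq] at hl
          simp only [Option.some.injEq] at hl
          have hk : k = k0 := (eq_of_beq hbeq).symm
          subst hk
          subst hl
          simp only [pvFoldMin, hf0]
          cases b with
          | none => exact pvFoldMin_zero f rest w
          | some p =>
              have h0 : 0 < p.1 := hb p rfl
              show pvFoldMin f rest (if 0 < p.1 then some (0, w) else some p) = some (0, w)
              rw [if_pos h0]
              exact pvFoldMin_zero f rest w
      | false =>
          rw [hbeq] at hl
          have hk : k ≠ k0 := fun he => by rw [he] at hbeq; simp at hbeq
          simp only [pvFoldMin]
          cases hfk : f k with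
          | none => exact ih b hl hb
          | some r =>
              have hr : r ≠ 0 := fun h0 => hinj k hk (by rw [hfk, h0])
              cases b with
              | none => exact ih (some (r, w)) hl (by rintro p hp; cases hp; omega)
              | some p =>
                  show pvFoldMin f rest (if r < p.1 then some (r, w) else some p) = some (0, v)
                  by_cases hlt : r < p.1
                  · rw [if_pos hlt]
                    exact ih (some (r, w)) hl (by rintro p' hp'; cases hp'; omega)
                  · rw [if_neg hlt]
                    exact ih (some p) hl hb

-- shifting every rank by 1 shifts the fold result
theorem pvFoldMin_shift (f f' : String → Option Nat) (rules : List (String × String))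
    (b : Option (Nat × String))
    (hfs : ∀ p ∈ rules, f p.1 = (f' p.1).map (· + 1)) :
    pvFoldMin f rules (b.map (fun p => (p.1 + 1, p.2))) =
      (pvFoldMin f' rules b).map (fun p => (p.1 + 1, p.2)) := by
  induction rules generalizing b with
  | nil => rfl
  | cons q rest ih =>
      cases q with | mk k v =>
      have hk : f k = (f' k).map (· + 1) := hfs (k, v) (by simp)
      have hrest : ∀ p ∈ rest, f p.1 = (f' p.1).map (· + 1) :=
        fun p hp => hfs p (by simp [hp])
      simp only [pvFoldMin, hk]
      cases hfk : f' k with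
      | none => simpa using ih b hrest
      | some r =>
          cases b with
          | none => simpa using ih (some (r, v)) hrest
          | some p =>
              simp only [Option.map_some]
              by_cases hlt : r < p.1
              · have : r + 1 < p.1 + 1 := by omega
                simp only [hlt, this, if_pos]
                simpa using ih (some (r, v)) hrest
              · have : ¬ (r + 1 < p.1 + 1) := by omega
                simp only [hlt, this, if_false]
                simpa using ih (some p) hrest

-- the bridge: A's first-hit scan over the key list equals B's min-rank fold over the rules
theorem pvScanK_eq_fold (ks : List String) (rules : List (String × String)) :
    pvScanK rules ks =
      (pvFoldMin (pvIdx ks) rules none).map (fun p => (PySem.Str.split? p.2 "/").getD []) := by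
  induction ks generalizing rules with
  | nil =>
      rw [pvFoldMin_none _ _ _ (fun p _ => rfl)]
      rfl
  | cons k0 ks' ih =>
      simp only [pvScanK]
      cases hl : List.lookup k0 rules with
      | some v =>
          rw [pvFoldMin_hit (pvIdx (k0 :: ks')) k0 v rules none
            (by simp [pvIdx])
            (by intro k hk
                have hne : k0 ≠ k := fun h2 => hk (Eq.symm h2)
                simp only [pvIdx, hne, if_false]
                cases pvIdx ks' k <;> simp)
            hl (by rintro p ⟨⟩)]
          rfl
      | none =>
          have hne : ∀ p ∈ rules, p.1 ≠ k0 := lookup_none_forall k0 rules hl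
          have hfs : ∀ p ∈ rules, pvIdx (k0 :: ks') p.1 = (pvIdx ks' p.1).map (· + 1) := by
            intro p hp
            have h2 : ¬ k0 = p.1 := fun he => hne p hp (Eq.symm he)
            simp [pvIdx, h2]
          have := pvFoldMin_shift (pvIdx (k0 :: ks')) (pvIdx ks') rules none hfs
          simp only [Option.map_none] at this
          rw [this, ih rules, Option.map_map]
          rfl

-- ===== VERDICT (by name: the statement is the Claim_ definition above) =====
set_option maxHeartbeats 1000000 in
theorem search_rules_spec : Claim_equal_search_rules := by
  intro rules unit _
  unfold Spec_search_rules search_rules search_rules_alt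
  -- the full key list both programs are about
  set K : List String :=
    pvKeysN unit 4 ++ pvKeysN ((pvRotate^[4] unit).reverse) 4 with hK
  -- B's side: the rank dict is pvIdx K, and the scan is the abstract fold
  have hsnd1 : (pvRankBuild PySem.Dict.empty 0 unit 4).2 = (4, pvRotate^[4] unit) :=
    pvRankBuild_snd _ _ _ _
  have hd1 : ∀ k, ((pvRankBuild PySem.Dict.empty 0 unit 4).1).get? k
      = pvIdx (pvKeysN unit 4) k := by
    intro k
    have := pvRankBuild_get? 4 unit [] PySem.Dict.empty
      (fun k => by simp [pvIdx, PySem.Dict.get?_empty]) k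
    simpa using this
  have hlen : (pvKeysN unit 4).length = 4 := length_pvKeysN unit 4
  have hd2 : ∀ k,
      ((pvRankBuild (pvRankBuild PySem.Dict.empty 0 unit 4).1
          (pvRankBuild PySem.Dict.empty 0 unit 4).2.1
          (pvRankBuild PySem.Dict.empty 0 unit 4).2.2.reverse 4).1).get? k
        = pvIdx K k := by
    intro k
    have h4 : (pvRankBuild PySem.Dict.empty 0 unit 4).2.1 = (pvKeysN unit 4).length := by
      rw [hsnd1, hlen]
    have hu : (pvRankBuild PySem.Dict.empty 0 unit 4).2.2.reverse = (pvRotate^[4] unit).reverse := by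
      rw [hsnd1]
    rw [h4, hu]
    exact pvRankBuild_get? 4 _ (pvKeysN unit 4) _ hd1 k
  have hBfold :
      pvBestScan (pvRankBuild (pvRankBuild PySem.Dict.empty 0 unit 4).1
          (pvRankBuild PySem.Dict.empty 0 unit 4).2.1
          (pvRankBuild PySem.Dict.empty 0 unit 4).2.2.reverse 4).1 rules none
        = pvFoldMin (pvIdx K) rules none := by
    rw [pvBestScan_eq]
    exact pvFoldMin_congr _ _ hd2 rules none
  -- A's side: the two check loops are the first-hit scan over K
  have hA : (match pvLoopA rules unit 4 with
      | (some r, _) => some r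
      | (none, u) => (pvLoopA rules u.reverse 4).1) = pvScanK rules K := by
    rw [hK, pvScanK_append]
    rcases hp : pvLoopA rules unit 4 with ⟨o, u2⟩
    cases o with
    | some r =>
        have h1 : (pvLoopA rules unit 4).1 = some r := by rw [hp]
        rw [pvLoopA_fst] at h1
        simp [h1]
    | none =>
        have h1 : (pvLoopA rules unit 4).1 = none := by rw [hp]
        have h1' := h1
        rw [pvLoopA_fst] at h1'
        have h2 : u2 = pvRotate^[4] unit := by
          have := pvLoopA_snd_of_none rules unit 4 h1
          rw [hp] at this; exact this
        simp only [h1']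
        rw [h2, pvLoopA_fst]
  simp only []
  rw [hA, hBfold, pvScanK_eq_fold]
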